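-- pv_equiv track=rewrite | github.com/meethari/MulensModel | source/MulensModel/modelparameters.py | _divide_parameters
-- ===== SOURCE A (Python) =====
-- def _divide_parameters(parameters):
--     """
--     Divide an input dict into 2 - each source separately.
--     Some of the parameters are copied to both dicts.
--     """
--     separate_parameters = ['t_0_1', 't_0_2', 'u_0_1', 'u_0_2',
--                            'rho_1', 'rho_2', 't_star_1', 't_star_2']
--     parameters_1 = {}
--     parameters_2 = {}
--     for (key, value) in parameters.items():
--         if key in separate_parameters:
--             if key[-2:] == "_1":
--                 parameters_1[key[:-2]] = value
--             elif key[-2:] == "_2":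
--                 parameters_2[key[:-2]] = value
--             else:
--                 raise ValueError('unexpected error')
--         else:
--             parameters_1[key] = value
--             parameters_2[key] = value
--     return (parameters_1, parameters_2)
-- ===== SOURCE B (Python) =====
-- def _divide_parameters(parameters):
--     special_1 = {'t_0_1', 'u_0_1', 'rho_1', 't_star_1'}
--     special_2 = {'t_0_2', 'u_0_2', 'rho_2', 't_star_2'}
--     parameters_1 = {(k[:-2] if k in special_1 else k): v
--                     for k, v in parameters.items() if k not in special_2}
--     parameters_2 = {(k[:-2] if k in special_2 else k): v
--                     for k, v in parameters.items() if k not in special_1}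
--     return (parameters_1, parameters_2)
-- ===== Notes on version B (the rewrite author's own statement) =====
-- stated objective: alternative
-- what changed: Replaces A's single interleaved classify-per-key loop building both dicts at once with two independent dict-comprehension passes (filter out the other source's special keys, strip the '_1'/'_2' suffix on own special keys).
import Mathlib
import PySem

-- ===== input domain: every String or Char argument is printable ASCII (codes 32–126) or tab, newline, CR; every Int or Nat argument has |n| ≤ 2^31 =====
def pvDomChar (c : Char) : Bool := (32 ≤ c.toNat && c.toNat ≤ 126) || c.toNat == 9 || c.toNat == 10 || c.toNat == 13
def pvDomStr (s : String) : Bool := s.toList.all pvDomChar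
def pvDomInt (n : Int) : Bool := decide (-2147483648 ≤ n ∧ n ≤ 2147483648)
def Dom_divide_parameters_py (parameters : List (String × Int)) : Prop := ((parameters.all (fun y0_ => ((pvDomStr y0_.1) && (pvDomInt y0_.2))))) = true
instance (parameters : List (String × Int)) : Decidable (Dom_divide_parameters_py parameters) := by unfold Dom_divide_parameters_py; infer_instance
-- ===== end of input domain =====

-- B replaces A's single interleaved classify-per-key loop with two independent
-- dict-comprehension passes (one per source); same cost, different decomposition.

-- ===== PORT A =====
-- the step of A's 'for (key, value) in parameters.items()' loop over the pair of result dicts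
def pvStepA (st : PySem.Dict String Int × PySem.Dict String Int) (kv : String × Int) :
    PySem.Dict String Int × PySem.Dict String Int :=
  if kv.1 ∈ ["t_0_1", "t_0_2", "u_0_1", "u_0_2", "rho_1", "rho_2", "t_star_1", "t_star_2"] then
    if PySem.Str.slice kv.1 (some (-2)) none = "_1" then
      (st.1.insert (PySem.Str.slice kv.1 none (some (-2))) kv.2, st.2)
    else if PySem.Str.slice kv.1 (some (-2)) none = "_2" then
      (st.1, st.2.insert (PySem.Str.slice kv.1 none (some (-2))) kv.2)
    else
      st  -- 'raise ValueError': unreachable, every key of the literal list ends in "_1" or "_2"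
  else
    (st.1.insert kv.1 kv.2, st.2.insert kv.1 kv.2)

def divide_parameters_py (parameters : List (String × Int)) : (List (String × Int)) × (List (String × Int)) :=
  let st := parameters.foldl pvStepA (PySem.Dict.empty, PySem.Dict.empty)
  (st.1.items, st.2.items)

-- ===== PORT B =====
-- one dict-comprehension pass: drop the other source's special keys, strip the suffix on own special keys
def pvPass (own other : List String) (parameters : List (String × Int)) : List (String × Int) :=
  (((parameters.filter (fun kv => kv.1 ∉ other)).map
      (fun kv => (if kv.1 ∈ own then PySem.Str.slice kv.1 none (some (-2)) else kv.1, kv.2))).foldl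
    (fun (d : PySem.Dict String Int) kv => d.insert kv.1 kv.2) PySem.Dict.empty).items

def divide_parameters_py_alt (parameters : List (String × Int)) : (List (String × Int)) × (List (String × Int)) :=
  (pvPass ["t_0_1", "u_0_1", "rho_1", "t_star_1"] ["t_0_2", "u_0_2", "rho_2", "t_star_2"] parameters,
   pvPass ["t_0_2", "u_0_2", "rho_2", "t_star_2"] ["t_0_1", "u_0_1", "rho_1", "t_star_1"] parameters)

-- ===== PRECONDITION & SPEC =====
def Spec_divide_parameters_py (parameters : List (String × Int)) (out : (List (String × Int)) × (List (String × Int))) : Prop := out = divide_parameters_py_alt parameters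
instance (parameters : List (String × Int)) (out : (List (String × Int)) × (List (String × Int))) : Decidable (Spec_divide_parameters_py parameters out) := by unfold Spec_divide_parameters_py; infer_instance

-- ===== CLAIM (what is proved, stated in full; the proofs are below) =====
def Claim_equal_divide_parameters_py : Prop := ∀ (parameters : List (String × Int)), Dom_divide_parameters_py parameters → Spec_divide_parameters_py parameters (divide_parameters_py parameters)

-- ===== LEMMAS AND PROOFS =====

-- B's pass body before taking .items, generalized to an arbitrary starting dict
def pvPassD (own other : List String) (parameters : List (String × Int)) (d : PySem.Dict String Int) :
    PySem.Dict String Int :=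
  ((parameters.filter (fun kv => kv.1 ∉ other)).map
      (fun kv => (if kv.1 ∈ own then PySem.Str.slice kv.1 none (some (-2)) else kv.1, kv.2))).foldl
    (fun (d : PySem.Dict String Int) kv => d.insert kv.1 kv.2) d

-- A's interleaved loop from any pair of dicts equals B's two independent passes from those dicts
lemma pvLoop (ps : List (String × Int)) (d1 d2 : PySem.Dict String Int) :
    ps.foldl pvStepA (d1, d2)
      = (pvPassD ["t_0_1", "u_0_1", "rho_1", "t_star_1"] ["t_0_2", "u_0_2", "rho_2", "t_star_2"] ps d1,
         pvPassD ["t_0_2", "u_0_2", "rho_2", "t_star_2"] ["t_0_1", "u_0_1", "rho_1", "t_star_1"] ps d2) := by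
  induction ps generalizing d1 d2 with
  | nil => simp [pvPassD]
  | cons kv rest ih =>
    obtain ⟨k, v⟩ := kv
    by_cases h : k ∈ ["t_0_1", "t_0_2", "u_0_1", "u_0_2", "rho_1", "rho_2", "t_star_1", "t_star_2"]
    · simp only [List.mem_cons, List.not_mem_nil, or_false] at h
      rcases h with h | h | h | h | h | h | h | h
      · subst h
        have e1 : PySem.Str.slice "t_0_1" (some (-2)) none = "_1" := by decide
        have e2 : PySem.Str.slice "t_0_1" none (some (-2)) = "t_0" := by decide
        simp [pvStepA, pvPassD, e1, e2, ih]
      · subst h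
        have e1 : PySem.Str.slice "t_0_2" (some (-2)) none = "_2" := by decide
        have e2 : PySem.Str.slice "t_0_2" none (some (-2)) = "t_0" := by decide
        simp [pvStepA, pvPassD, e1, e2, ih]
      · subst h
        have e1 : PySem.Str.slice "u_0_1" (some (-2)) none = "_1" := by decide
        have e2 : PySem.Str.slice "u_0_1" none (some (-2)) = "u_0" := by decide
        simp [pvStepA, pvPassD, e1, e2, ih]
      · subst h
        have e1 : PySem.Str.slice "u_0_2" (some (-2)) none = "_2" := by decide
        have e2 : PySem.Str.slice "u_0_2" none (some (-2)) = "u_0" := by decide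
        simp [pvStepA, pvPassD, e1, e2, ih]
      · subst h
        have e1 : PySem.Str.slice "rho_1" (some (-2)) none = "_1" := by decide
        have e2 : PySem.Str.slice "rho_1" none (some (-2)) = "rho" := by decide
        simp [pvStepA, pvPassD, e1, e2, ih]
      · subst h
        have e1 : PySem.Str.slice "rho_2" (some (-2)) none = "_2" := by decide
        have e2 : PySem.Str.slice "rho_2" none (some (-2)) = "rho" := by decide
        simp [pvStepA, pvPassD, e1, e2, ih]
      · subst h
        have e1 : PySem.Str.slice "t_star_1" (some (-2)) none = "_1" := by decide
        have e2 : PySem.Str.slice "t_star_1" none (some (-2)) = "t_star" := by decide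
        simp [pvStepA, pvPassD, e1, e2, ih]
      · subst h
        have e1 : PySem.Str.slice "t_star_2" (some (-2)) none = "_2" := by decide
        have e2 : PySem.Str.slice "t_star_2" none (some (-2)) = "t_star" := by decide
        simp [pvStepA, pvPassD, e1, e2, ih]
    · simp only [List.mem_cons, List.not_mem_nil, or_false, not_or] at h
      obtain ⟨n1, n2, n3, n4, n5, n6, n7, n8⟩ := h
      simp [pvStepA, pvPassD, n1, n2, n3, n4, n5, n6, n7, n8, ih]

-- ===== VERDICT (by name: the statement is the Claim_ definition above) =====
theorem divide_parameters_py_spec : Claim_equal_divide_parameters_py := by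
  intro parameters _
  unfold Spec_divide_parameters_py divide_parameters_py divide_parameters_py_alt
  rw [pvLoop]
  rfl
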